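-- pv_equiv track=rewrite | github.com/diogo-guimaraes-repo/boilerplate-budget-app | budget.py | draw_categories
-- ===== SOURCE A (Python) =====
-- def draw_categories(pairs):
--   chart = ""
--   max_name_len = 0
--
--   for pair in pairs:
--     if len(pair["category_name"]) > max_name_len:
--       max_name_len = len(pair["category_name"])
--
--   for i in range(max_name_len):
--     chart += "    "
--     for j, pair in enumerate(pairs):
--       cat_name = pair["category_name"]
--       if i < len(cat_name):
--         chart += cat_name[i].center(3, " ")
--       else:
--         for k in range(3):
--           chart += " "
--
--       if j == len(pairs)-1:
--         chart += " "
--         if i < max_name_len-1: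
--           chart += "\n"
--
--   return chart
-- ===== SOURCE B (Python) =====
-- def draw_categories(pairs):
--     names = [p["category_name"] for p in pairs]
--     m = max((len(n) for n in names), default=0)
--     width = 4 + 3 * len(names) + 1
--     grid = [[" "] * width for _ in range(m)]
--     for j, n in enumerate(names):
--         col = 5 + 3 * j
--         for i, ch in enumerate(n):
--             grid[i][col] = ch
--     return "\n".join("".join(row) for row in grid)
-- ===== Notes on version B (the rewrite author's own statement) =====
-- stated objective: alternative
-- what changed: B preallocates an m x width grid of spaces and fills it column-by-column (one pass per name writing its characters down its column), then serializes the rows, instead of A's row-major character-appending fold with per-cell branches and last-column/last-row conditionals.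
import Mathlib
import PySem

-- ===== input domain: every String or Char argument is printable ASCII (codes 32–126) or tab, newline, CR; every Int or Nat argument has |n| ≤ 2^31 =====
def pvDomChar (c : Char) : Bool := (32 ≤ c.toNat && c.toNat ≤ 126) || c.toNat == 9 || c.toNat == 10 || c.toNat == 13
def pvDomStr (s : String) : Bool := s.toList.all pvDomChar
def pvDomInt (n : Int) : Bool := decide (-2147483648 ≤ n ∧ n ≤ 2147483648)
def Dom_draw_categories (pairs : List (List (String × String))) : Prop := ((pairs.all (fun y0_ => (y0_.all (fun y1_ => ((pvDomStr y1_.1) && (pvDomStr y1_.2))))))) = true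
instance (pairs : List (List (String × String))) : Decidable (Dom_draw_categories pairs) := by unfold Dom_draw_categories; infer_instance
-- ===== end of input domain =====

-- B fills a preallocated grid of spaces column by column (one pass per category name)
-- and serializes the rows, instead of A's row-major character-appending fold; equal return values proved on Pre_.

-- ===== PORT A =====
-- pair["category_name"] (KeyError = none is excluded by Pre_; outside Pre_ the port defaults to "")
def pvNameA (pair : List (String × String)) : List Char :=
  (((PySem.Dict.mk pair).get? "category_name").getD "").toList

-- one step of A's inner `for j, pair in enumerate(pairs)` loop (L = len(pairs), mlen = max_name_len)
def pvStepA (L : Nat) (mlen i : Nat) (chart : List Char) (jp : Int × List (String × String)) : List Char :=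
  let cat := pvNameA jp.2
  let chart :=
    if i < cat.length then
      -- cat_name[i].center(3, " ") : a 1-char string centered to width 3 is ' ' c ' ' (exact)
      chart ++ [' ', (PySem.List.pyGet? cat (i : Int)).getD ' ', ' ']
    else
      -- for k in range(3): chart += " "
      (List.range 3).foldl (fun c _ => c ++ [' ']) chart
  if jp.1 = (L : Int) - 1 then
    let chart := chart ++ [' ']
    if i < mlen - 1 then chart ++ ['\n'] else chart
  else chart

def draw_categories (pairs : List (List (String × String))) : String :=
  let max_name_len := pairs.foldl
    (fun m pair => if (pvNameA pair).length > m then (pvNameA pair).length else m) 0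
  let chart := (List.range max_name_len).foldl
    (fun chart i =>
      (PySem.List.enumerate pairs 0).foldl (pvStepA pairs.length max_name_len i)
        (chart ++ [' ', ' ', ' ', ' ']))
    []
  String.ofList chart

-- ===== PORT B =====
def draw_categories_alt (pairs : List (List (String × String))) : String :=
  let names := pairs.map (fun p => (((PySem.Dict.mk p).get? "category_name").getD "").toList)
  -- m = max((len(n) for n in names), default=0)
  let m := names.foldl (fun a n => max a n.length) 0
  let width := 4 + 3 * names.length + 1
  -- grid = [[" "] * width for _ in range(m)]
  let grid := (List.range m).map (fun _ => List.replicate width ' ')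
  -- column-major fill: for j, n in enumerate(names): for i, ch in enumerate(n): grid[i][5+3*j] = ch
  -- (enumerate indices are ≥ 0, so .toNat is exact; every write is in range, so modify/set never no-op)
  let grid := (PySem.List.enumerate names 0).foldl
    (fun g jn =>
      (PySem.List.enumerate jn.2 0).foldl
        (fun g ic => g.modify ic.1.toNat (fun row => row.set (5 + 3 * jn.1).toNat ic.2)) g)
    grid
  -- "\n".join("".join(row) for row in grid)
  String.ofList (PySem.Chars.join ['\n'] grid)

-- ===== PRECONDITION & SPEC =====
-- Pre_ excludes exactly the inputs where A raises KeyError: a pair dict without the "category_name" key.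
def Pre_draw_categories (pairs : List (List (String × String))) : Prop :=
  ∀ p ∈ pairs, (PySem.Dict.mk p).contains "category_name" = true
instance (pairs : List (List (String × String))) : Decidable (Pre_draw_categories pairs) := by
  unfold Pre_draw_categories; infer_instance

def pvWitness_draw_categories : (List (List (String × String))) :=
  [[("category_name", "food")], [("category_name", "fun")]]

def Spec_draw_categories (pairs : List (List (String × String))) (out : String) : Prop := out = draw_categories_alt pairs
instance (pairs : List (List (String × String))) (out : String) : Decidable (Spec_draw_categories pairs out) := by unfold Spec_draw_categories; infer_instance

-- ===== CLAIM (what is proved, stated in full; the proofs are below) =====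
def Claim_equal_draw_categories : Prop := ∀ (pairs : List (List (String × String))), Dom_draw_categories pairs → Pre_draw_categories pairs → Spec_draw_categories pairs (draw_categories pairs)

-- ===== LEMMAS AND PROOFS =====

-- the 3-character cell of row i contributed by name n
def pvCellN (i : Nat) (n : List Char) : List Char :=
  if i < n.length then [' ', (PySem.List.pyGet? n (i : Int)).getD ' ', ' ']
  else [' ', ' ', ' ']

def pvCellA (i : Nat) (p : List (String × String)) : List Char := pvCellN i (pvNameA p)

-- row i of the grid when the columns of `done` are filled and `t` columns are still blank
def pvRowP (done : List (List Char)) (t i : Nat) : List Char :=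
  [' ', ' ', ' ', ' '] ++ done.flatMap (pvCellN i) ++ List.replicate (3 * t) ' ' ++ [' ']

-- ---------- A-side: A's fold builds the rows of the target table ----------

-- A's inner enumerate loop appends the row cells, a trailing space, and a newline except on the last row
lemma pvInnerA (mlen i : Nat) :
    ∀ (l : List (List (String × String))) (k : Int) (L : Nat) (acc : List Char),
      l ≠ [] → k + l.length = (L : Int) →
      (PySem.List.enumerate l k).foldl (pvStepA L mlen i) acc
        = acc ++ l.flatMap (pvCellA i) ++ [' ']
            ++ (if i < mlen - 1 then ['\n'] else []) := by
  intro l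
  induction l with
  | nil => intro k L acc h _; exact absurd rfl h
  | cons p rest ih =>
    intro k L acc _ hk
    rw [PySem.List.enumerate_cons]
    cases rest with
    | nil =>
      have hkl : k = (L : Int) - 1 := by simp at hk; omega
      simp only [PySem.List.enumerate_nil, List.foldl_cons, List.foldl_nil, pvStepA]
      rw [if_pos hkl]
      by_cases hi : i < (pvNameA p).length <;>
        by_cases hm : i < mlen - 1 <;>
          simp [pvCellA, pvCellN, hi, hm, List.range_succ]
    | cons q rest' =>
      have hne : k ≠ (L : Int) - 1 := by
        push_cast [List.length_cons] at hk; omega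
      rw [List.foldl_cons, ih (k+1) L _ (by simp) (by push_cast [List.length_cons] at hk ⊢; omega)]
      simp only [pvStepA]
      rw [if_neg hne]
      by_cases hi : i < (pvNameA p).length
      · simp [pvCellA, pvCellN, hi]
      · simp [pvCellA, pvCellN, hi]

-- A's running-max loop is a fold of `max`
lemma pvMaxA (l : List (List (String × String))) :
    ∀ a : Nat,
      l.foldl (fun m pair => if (pvNameA pair).length > m then (pvNameA pair).length else m) a
        = (l.map pvNameA).foldl (fun a n => max a n.length) a := by
  induction l with
  | nil => intro a; rfl
  | cons p rest ih =>
    intro a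
    simp only [List.foldl_cons, List.map_cons, ih]
    congr 1
    split <;> omega

-- rows with a newline after every row but the last = join with '\n'
lemma pvJoinRange : ∀ (m : Nat) (f : Nat → List Char),
    (List.range m).flatMap (fun i => f i ++ if i < m - 1 then ['\n'] else [])
      = PySem.Chars.join ['\n'] ((List.range m).map f) := by
  intro m
  induction m with
  | zero => intro f; rfl
  | succ n ih =>
    intro f
    rw [List.range_succ_eq_map]
    simp only [List.flatMap_cons, List.flatMap_map, List.map_cons, List.map_map]
    have step : (List.range n).flatMap
        (fun i => f (Nat.succ i) ++ if Nat.succ i < n + 1 - 1 then ['\n'] else [])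
        = PySem.Chars.join ['\n'] ((List.range n).map (f ∘ Nat.succ)) := by
      rw [← ih (f ∘ Nat.succ)]
      apply List.flatMap_congr
      intro i hi
      congr 1
      have h2 : Nat.succ i < n + 1 - 1 ↔ i < n - 1 := by omega
      simp only [h2]
    rw [step]
    cases n with
    | zero => simp [PySem.Chars.join_singleton, PySem.Chars.join_nil]
    | succ n' =>
      rw [List.range_succ_eq_map (n := n')]
      simp only [List.map_cons, List.map_map]
      rw [PySem.Chars.join_cons_cons]
      simp [List.append_assoc]

-- ---------- B-side: the column-major grid fill produces the same rows ----------

-- modifying one entry of a table over `range m`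
lemma pvModifyMapRange {α : Type} (m k : Nat) (f : Nat → α) (g : α → α) :
    ((List.range m).map f).modify k g
      = (List.range m).map (fun i => if k = i then g (f i) else f i) := by
  apply List.ext_getElem
  · simp
  · intro j h1 h2
    simp only [List.getElem_modify, List.getElem_map, List.getElem_range]

-- a cell of a filled column has length 3, so the filled prefix has length 3 * done.length
lemma pvFlatLen (i : Nat) (done : List (List Char)) :
    (done.flatMap (pvCellN i)).length = 3 * done.length := by
  induction done with
  | nil => rfl
  | cons n rest ih =>
    simp only [List.flatMap_cons, List.length_append, ih, List.length_cons]
    have : (pvCellN i n).length = 3 := by unfold pvCellN; split <;> rfl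
    omega

-- writing n[k] at column 5+3*done.length of a pending row fills that row's cell of n
lemma pvSetAt (xs ys : List Char) (c : Char) (a : Nat) (ha : a = xs.length) :
    (xs ++ ' ' :: ys).set a c = xs ++ c :: ys := by
  subst ha
  rw [List.set_append, if_neg (lt_irrefl _), Nat.sub_self]
  rfl

lemma pvSetCell (done : List (List Char)) (n : List Char) (t k : Nat) (hk : k < n.length) :
    (pvRowP done (t + 1) k).set (5 + 3 * done.length) n[k]
      = pvRowP (done ++ [n]) t k := by
  unfold pvRowP
  have hblob := pvFlatLen k done
  have hrep : List.replicate (3 * (t + 1)) ' '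
      = ' ' :: ' ' :: ' ' :: List.replicate (3 * t) ' ' := by
    rw [show 3 * (t + 1) = 3 * t + 1 + 1 + 1 by ring,
      List.replicate_succ, List.replicate_succ, List.replicate_succ]
  have hcell : pvCellN k n = [' ', n[k], ' '] := by
    unfold pvCellN
    rw [if_pos hk, PySem.List.pyGet?_natCast]
    simp [List.getElem?_eq_getElem hk]
  have h1 : [' ', ' ', ' ', ' '] ++ done.flatMap (pvCellN k)
        ++ (' ' :: ' ' :: ' ' :: List.replicate (3 * t) ' ') ++ [' ']
      = ([' ', ' ', ' ', ' '] ++ done.flatMap (pvCellN k) ++ [' '])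
        ++ ' ' :: (' ' :: (List.replicate (3 * t) ' ' ++ [' '])) := by
    simp
  rw [hrep, h1, pvSetAt _ _ _ _ (by simp [hblob]; omega)]
  simp [List.flatMap_append, hcell, List.append_assoc]

-- for rows below the name, pending and filled rows coincide (the cell is blank either way)
lemma pvRowBlank (done : List (List Char)) (n : List Char) (t i : Nat) (hi : ¬ i < n.length) :
    pvRowP done (t + 1) i = pvRowP (done ++ [n]) t i := by
  unfold pvRowP
  have hcell : pvCellN i n = [' ', ' ', ' '] := by unfold pvCellN; rw [if_neg hi]
  have hrep : List.replicate (3 * (t + 1)) ' ' = [' ', ' ', ' '] ++ List.replicate (3 * t) ' ' := by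
    rw [show 3 * (t + 1) = 3 + 3 * t by ring, ← List.replicate_append_replicate]; rfl
  simp [List.flatMap_append, hcell, hrep, List.append_assoc]

-- the inner loop over one name fills exactly its column of the grid
lemma pvCol (m : Nat) (done : List (List Char)) (n : List Char) (t : Nat) :
    ∀ (d k : Nat), k + d = n.length →
      (PySem.List.enumerate (n.drop k) (k : Int)).foldl
          (fun g ic => g.modify ic.1.toNat
            (fun row => row.set (5 + 3 * (done.length : Int)).toNat ic.2)) 
          ((List.range m).map (fun i => if i < k then pvRowP (done ++ [n]) t i else pvRowP done (t + 1) i))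
        = (List.range m).map (pvRowP (done ++ [n]) t) := by
  intro d
  induction d with
  | zero =>
    intro k hk
    rw [List.drop_eq_nil_of_le (by omega), PySem.List.enumerate_nil, List.foldl_nil]
    apply List.map_congr_left
    intro i _
    by_cases hik : i < k
    · rw [if_pos hik]
    · rw [if_neg hik]
      exact pvRowBlank done n t i (by omega)
  | succ d ih =>
    intro k hk
    have hklt : k < n.length := by omega
    rw [List.drop_eq_getElem_cons hklt, PySem.List.enumerate_cons, List.foldl_cons]
    have hcol : ((5 : Int) + 3 * (done.length : Int)).toNat = 5 + 3 * done.length := by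
      omega
    have hstep :
        (((List.range m).map (fun i => if i < k then pvRowP (done ++ [n]) t i else pvRowP done (t + 1) i)).modify
            ((k : Int)).toNat (fun row => row.set (5 + 3 * (done.length : Int)).toNat n[k]))
          = (List.range m).map (fun i => if i < k + 1 then pvRowP (done ++ [n]) t i else pvRowP done (t + 1) i) := by
      rw [Int.toNat_natCast, hcol, pvModifyMapRange]
      apply List.map_congr_left
      intro i _
      by_cases hik : k = i
      · subst hik
        rw [if_pos rfl, if_neg (by omega), if_pos (by omega)]
        exact pvSetCell done n t k hklt
      · rw [if_neg hik]
        by_cases hi : i < k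
        · rw [if_pos hi, if_pos (by omega)]
        · rw [if_neg hi, if_neg (by omega)]
    rw [hstep, show (k : Int) + 1 = ((k + 1 : Nat) : Int) by push_cast; ring]
    exact ih (k + 1) (by omega)

-- the inner loop starting from index 0 on the all-pending grid
lemma pvCol0 (m : Nat) (done : List (List Char)) (n : List Char) (t : Nat) :
    (PySem.List.enumerate n 0).foldl
        (fun g ic => g.modify ic.1.toNat
          (fun row => row.set (5 + 3 * (done.length : Int)).toNat ic.2))
        ((List.range m).map (pvRowP done (t + 1)))
      = (List.range m).map (pvRowP (done ++ [n]) t) := by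
  have h := pvCol m done n t n.length 0 (by omega)
  simpa using h

-- the outer loop over names fills all columns
lemma pvOuter (m : Nat) :
    ∀ (rest done : List (List Char)), (∀ n ∈ rest, n.length ≤ m) →
      (PySem.List.enumerate rest (done.length : Int)).foldl
          (fun g jn =>
            (PySem.List.enumerate jn.2 0).foldl
              (fun g ic => g.modify ic.1.toNat (fun row => row.set (5 + 3 * jn.1).toNat ic.2)) g)
          ((List.range m).map (pvRowP done rest.length))
        = (List.range m).map (pvRowP (done ++ rest) 0) := by
  intro rest
  induction rest with
  | nil => intro done _; simp
  | cons n rest' ih =>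
    intro done hlen
    rw [PySem.List.enumerate_cons, List.foldl_cons]
    dsimp only
    rw [List.length_cons, pvCol0 m done n rest'.length]
    rw [show (done.length : Int) + 1 = (((done ++ [n]).length : Nat) : Int) by simp]
    rw [ih (done ++ [n]) (fun q hq => hlen q (by simp [hq]))]
    simp

-- the outer loop from the blank start (start index 0 = [].length)
lemma pvOuterAll (m : Nat) (names : List (List Char)) (h : ∀ n ∈ names, n.length ≤ m) :
    (PySem.List.enumerate names 0).foldl
        (fun g jn =>
          (PySem.List.enumerate jn.2 0).foldl
            (fun g ic => g.modify ic.1.toNat (fun row => row.set (5 + 3 * jn.1).toNat ic.2)) g)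
        ((List.range m).map (pvRowP [] names.length))
      = (List.range m).map (pvRowP names 0) := by
  have h2 := pvOuter m names [] h
  simpa using h2

-- the blank grid is the table of fully pending rows
lemma pvGridInit (m L : Nat) :
    (List.range m).map (fun _ => List.replicate (4 + 3 * L + 1) ' ')
      = (List.range m).map (pvRowP [] L) := by
  apply List.map_congr_left
  intro i _
  unfold pvRowP
  rw [show (4 + 3 * L + 1) = 4 + (3 * L + 1) by ring, ← List.replicate_append_replicate,
    ← List.replicate_append_replicate]
  rfl

theorem pvMain (pairs : List (List (String × String))) :
    draw_categories pairs = draw_categories_alt pairs := by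
  unfold draw_categories draw_categories_alt
  dsimp only
  have hnames : pairs.map (fun p => (((PySem.Dict.mk p).get? "category_name").getD "").toList)
      = pairs.map pvNameA := by simp [pvNameA]
  rw [hnames]
  set names := pairs.map pvNameA with hn
  set m := names.foldl (fun a n => max a n.length) 0 with hm
  rw [pvMaxA pairs 0, ← hn, ← hm]
  congr 1
  -- every name is at most m long
  have hlen : ∀ n ∈ names, n.length ≤ m := by
    intro n hn'
    have := (PySem.List.le_foldl_max (names.map List.length) 0).2
    rw [List.foldl_map] at this
    exact this n.length (List.mem_map_of_mem hn')
  -- B's grid fill = the table of finished rows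
  have hlenn : names.length = pairs.length := by rw [hn, List.length_map]
  have hgrid :
      (PySem.List.enumerate names 0).foldl
          (fun g jn =>
            (PySem.List.enumerate jn.2 0).foldl
              (fun g ic => g.modify ic.1.toNat (fun row => row.set (5 + 3 * jn.1).toNat ic.2)) g)
          ((List.range m).map (fun _ => List.replicate (4 + 3 * names.length + 1) ' '))
        = (List.range m).map (pvRowP names 0) := by
    rw [pvGridInit m names.length, pvOuterAll m names hlen]
  rw [hgrid]
  -- A's fold = the join of the same rows
  cases pairs with
  | nil => simp_all
  | cons p rest =>
    have hne : (p :: rest) ≠ ([] : List (List (String × String))) := by simp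
    have hrow : ∀ (chart : List Char) (i : Nat),
        (PySem.List.enumerate (p :: rest) 0).foldl (pvStepA (p :: rest).length m i)
          (chart ++ [' ', ' ', ' ', ' '])
        = chart ++ ([' ', ' ', ' ', ' ']
            ++ (p :: rest).flatMap (pvCellA i) ++ [' ']
            ++ (if i < m - 1 then ['\n'] else [])) := by
      intro chart i
      rw [pvInnerA m i (p :: rest) 0 (p :: rest).length (chart ++ [' ', ' ', ' ', ' ']) hne (by simp)]
      simp [List.append_assoc]
    have hfold : (List.range m).foldl
        (fun chart i =>
          (PySem.List.enumerate (p :: rest) 0).foldl (pvStepA (p :: rest).length m i)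
            (chart ++ [' ', ' ', ' ', ' ']))
        []
        = (List.range m).foldl
          (fun chart i => chart ++ ([' ', ' ', ' ', ' ']
              ++ (p :: rest).flatMap (pvCellA i) ++ [' ']
              ++ (if i < m - 1 then ['\n'] else []))) [] := by
      congr 1
      funext chart i
      exact hrow chart i
    rw [hfold, PySem.List.foldl_append_eq_flatMap]
    have hsplit : ∀ i : Nat,
        ([' ', ' ', ' ', ' ']
            ++ (p :: rest).flatMap (pvCellA i) ++ [' ']
            ++ (if i < m - 1 then ['\n'] else []))
        = (fun j => [' ', ' ', ' ', ' '] ++ (p :: rest).flatMap (pvCellA j) ++ [' ']) i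
            ++ (if i < m - 1 then ['\n'] else []) := by
      intro i; simp [List.append_assoc]
    simp only [hsplit]
    rw [List.nil_append, pvJoinRange m]
    congr 1
    apply List.map_congr_left
    intro i _
    unfold pvRowP
    rw [hn, List.flatMap_map,
      show (fun a => pvCellN i (pvNameA a)) = pvCellA i from rfl]
    simp [List.append_assoc]

-- ===== VERDICT (by name: the statement is the Claim_ definition above) =====
theorem draw_categories_spec : Claim_equal_draw_categories := by
  intro pairs _ _
  unfold Spec_draw_categories
  exact pvMain pairs
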